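-- pv_equiv track=rewrite | github.com/ICOS-Carbon-Portal/meta | prototype_relational/scripts/count_prefixes.py | filter_to_leaf_prefixes
-- ===== SOURCE A (Python) =====
-- def filter_to_leaf_prefixes(prefix_counts):
--     """
--     Filter to only leaf prefixes - prefixes that have subjects not accounted
--     for by any longer prefixes.
--
--     A prefix is a leaf if its count is greater than the sum of counts of all
--     longer prefixes that start with it.
--     """
--     leaf_prefixes = {}
--
--     # Sort prefixes by length to process shorter ones first
--     sorted_prefixes = sorted(prefix_counts.keys(), key=len)
--
--     for prefix in sorted_prefixes:
--         # Find all longer prefixes that start with this prefix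
--         child_count = 0
--         for other_prefix in prefix_counts:
--             if other_prefix != prefix and other_prefix.startswith(prefix):
--                 child_count += prefix_counts[other_prefix]
--
--         # If the counts don't match, this prefix has unique subjects (it's a leaf)
--         if child_count < prefix_counts[prefix]:
--             leaf_prefixes[prefix] = prefix_counts[prefix]
--
--     return leaf_prefixes
-- ===== SOURCE B (Python) =====
-- def filter_to_leaf_prefixes(prefix_counts):
--     # One pass over the keys: each key q pushes its count onto every proper
--     # prefix of q that is itself a key, instead of scanning all keys per key.
--     child_sum = {p: 0 for p in prefix_counts}
--     for q, c in prefix_counts.items():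
--         for l in range(len(q)):
--             p = q[:l]
--             if p in prefix_counts:
--                 child_sum[p] += c
--     return {p: prefix_counts[p]
--             for p in sorted(prefix_counts, key=len)
--             if child_sum[p] < prefix_counts[p]}
-- ===== Notes on version B (the rewrite author's own statement) =====
-- stated objective: faster
-- what changed: A scans the whole key set once per key to sum descendant counts; B makes a single pass in which each key pushes its count onto its proper prefixes that are themselves keys (hash-map accumulation), then filters the length-sorted keys once. Pre_ only excludes association lists with duplicate keys, which do not represent a Python dict argument.
import Mathlib
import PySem

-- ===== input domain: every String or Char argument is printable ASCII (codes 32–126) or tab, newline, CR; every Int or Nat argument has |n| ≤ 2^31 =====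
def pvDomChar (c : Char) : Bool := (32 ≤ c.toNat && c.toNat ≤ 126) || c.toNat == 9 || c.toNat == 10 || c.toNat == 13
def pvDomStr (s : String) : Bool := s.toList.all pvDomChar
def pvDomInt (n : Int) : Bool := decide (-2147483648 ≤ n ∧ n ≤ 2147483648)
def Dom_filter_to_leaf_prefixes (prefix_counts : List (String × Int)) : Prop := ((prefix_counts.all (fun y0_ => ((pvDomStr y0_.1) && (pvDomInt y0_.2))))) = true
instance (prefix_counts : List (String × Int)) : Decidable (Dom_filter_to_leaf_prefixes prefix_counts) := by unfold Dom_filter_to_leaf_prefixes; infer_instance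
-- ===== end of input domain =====

-- B replaces A's per-key scan of all keys by one pass that pushes each key's count
-- onto its proper prefixes that are themselves keys (objective: faster).

-- ===== PORT A =====
-- The Python parameter is a dict; its Lean value is the association list, viewed
-- through PySem.Dict.mk.  prefix_counts[other_prefix] is ported as getD _ 0: the
-- looked-up key always comes from the dict itself, so KeyError is impossible.
def filter_to_leaf_prefixes (prefix_counts : List (String × Int)) : List (String × Int) :=
  let d : PySem.Dict String Int := PySem.Dict.mk prefix_counts
  let sorted_prefixes := PySem.List.sorted d.keys (fun s => PySem.Str.len s)
  sorted_prefixes.foldl (fun leaf_prefixes p =>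
    if (d.items.foldl (fun child_count kv =>
          if (kv.1 != p) && PySem.Str.startswith kv.1 p
          then child_count + d.getD kv.1 0 else child_count) 0)
       < d.getD p 0
    then leaf_prefixes ++ [(p, d.getD p 0)]
    else leaf_prefixes) []

-- ===== PORT B =====
def filter_to_leaf_prefixes_alt (prefix_counts : List (String × Int)) : List (String × Int) :=
  let d : PySem.Dict String Int := PySem.Dict.mk prefix_counts
  let child_sum0 : PySem.Dict String Int :=
    d.keys.foldl (fun m p => m.insert p 0) PySem.Dict.empty
  let child_sum :=
    d.items.foldl (fun m kv =>
      (PySem.List.pyRange 0 (PySem.Str.len kv.1)).foldl (fun m l =>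
        if d.contains (PySem.Str.slice kv.1 none (some l))
        then m.modify (PySem.Str.slice kv.1 none (some l)) 0 (· + kv.2)
        else m) m) child_sum0
  ((PySem.List.sorted d.keys (fun s => PySem.Str.len s)).filter
      (fun p => decide (child_sum.getD p 0 < d.getD p 0))).map
    (fun p => (p, d.getD p 0))

-- ===== PRECONDITION & SPEC =====
-- Pre_ excludes association lists with duplicate keys: the Python argument is a
-- dict, and a duplicate-key list does not represent one.
def Pre_filter_to_leaf_prefixes (prefix_counts : List (String × Int)) : Prop :=
  (prefix_counts.map Prod.fst).Nodup
instance (prefix_counts : List (String × Int)) : Decidable (Pre_filter_to_leaf_prefixes prefix_counts) := by unfold Pre_filter_to_leaf_prefixes; infer_instance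

def pvWitness_filter_to_leaf_prefixes : (List (String × Int)) := [("a", 2), ("ab", 1)]

def Spec_filter_to_leaf_prefixes (prefix_counts : List (String × Int)) (out : List (String × Int)) : Prop := out = filter_to_leaf_prefixes_alt prefix_counts
instance (prefix_counts : List (String × Int)) (out : List (String × Int)) : Decidable (Spec_filter_to_leaf_prefixes prefix_counts out) := by unfold Spec_filter_to_leaf_prefixes; infer_instance

-- ===== CLAIM (what is proved, stated in full; the proofs are below) =====
def Claim_equal_filter_to_leaf_prefixes : Prop := ∀ (prefix_counts : List (String × Int)), Dom_filter_to_leaf_prefixes prefix_counts → Pre_filter_to_leaf_prefixes prefix_counts → Spec_filter_to_leaf_prefixes prefix_counts (filter_to_leaf_prefixes prefix_counts)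

-- ===== LEMMAS AND PROOFS =====

-- The initial child_sum dict maps every key to 0.
lemma pv_cs0_getD (ks : List String) (m : PySem.Dict String Int) (p : String)
    (hm : m.getD p 0 = 0) :
    (ks.foldl (fun m k => m.insert k 0) m).getD p 0 = 0 := by
  induction ks generalizing m with
  | nil => exact hm
  | cons k t ih =>
      rw [List.foldl_cons]
      refine ih _ ?_
      rw [PySem.Dict.getD_insert]
      split <;> simp [hm]

-- Effect of B's inner loop (over the proper-prefix lengths of one key q) on one
-- entry p of the accumulator dict.
lemma pv_inner_getD (d : PySem.Dict String Int) (q : String) (c : Int) (p : String)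
    (L : List Int) (m : PySem.Dict String Int) :
    (L.foldl (fun m l =>
        if d.contains (PySem.Str.slice q none (some l))
        then m.modify (PySem.Str.slice q none (some l)) 0 (· + c) else m) m).getD p 0
    = m.getD p 0
      + c * ((L.countP (fun l =>
          (PySem.Str.slice q none (some l) == p) && d.contains p) : Int)) := by
  induction L generalizing m with
  | nil => simp
  | cons l t ih =>
      rw [List.foldl_cons, List.countP_cons]
      by_cases hsl : PySem.Str.slice q none (some l) = p
      · rw [hsl]
        cases hc : d.contains p with
        | false => simp [hc, ih]
        | true =>
            rw [if_pos rfl, ih, PySem.Dict.getD_modify_self]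
            simp only [hc, beq_self_eq_true, Bool.and_self, if_pos]
            push_cast
            ring
      · have hb : (PySem.Str.slice q none (some l) == p) = false := by
          simpa using hsl
        cases hc2 : d.contains (PySem.Str.slice q none (some l)) with
        | false => simp [hb, ih]
        | true =>
            rw [if_pos rfl, ih, PySem.Dict.getD_modify_of_ne]
            · simp [hb]
            · exact fun h => hsl h.symm

-- Counting which cut lengths of Q reproduce P: exactly one when P is a proper
-- prefix of Q, none otherwise.
lemma pv_countP_prefix (Q P : List Char) :
    ((List.range Q.length).countP (fun k => decide (Q.take k = P)))
    = if P <+: Q ∧ P.length < Q.length then 1 else 0 := by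
  have hcong : ∀ k ∈ List.range Q.length,
      ((decide (Q.take k = P)) = true)
      ↔ ((fun k => decide (k = P.length ∧ P <+: Q)) k = true) := by
    intro k hk
    rw [List.mem_range] at hk
    simp only [decide_eq_true_eq]
    constructor
    · intro h
      have hlen : P.length = k := by
        rw [← h, List.length_take]; omega
      exact ⟨hlen.symm, h ▸ List.take_prefix k Q⟩
    · rintro ⟨hk', hpre⟩
      subst hk'
      exact ((List.prefix_iff_eq_take).mp hpre).symm
  rw [List.countP_congr hcong]
  by_cases hpre : P <+: Q
  · have h2 : ∀ k ∈ List.range Q.length,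
        ((decide (k = P.length ∧ P <+: Q)) = true)
        ↔ ((fun k => k == P.length) k = true) := by
      intro k _; simp [hpre]
    rw [List.countP_congr h2,
      show (List.range Q.length).countP (fun k => k == P.length)
        = (List.range Q.length).count P.length from rfl,
      List.count_range]
    by_cases hlt : P.length < Q.length
    · rw [if_pos hlt, if_pos ⟨hpre, hlt⟩]
    · rw [if_neg hlt, if_neg (fun h => hlt h.2)]
  · rw [List.countP_eq_zero.mpr (by intro k _; simp [hpre]),
      if_neg (fun h => hpre h.1)]

-- Taking l characters of q yields p exactly when p is a prefix of q of length l.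
lemma pv_slice_eq_iff (q p : String) (k : Nat) :
    ((PySem.Str.slice q none (some (k : Int)) == p) = true) ↔ (q.toList.take k = p.toList) := by
  simp only [beq_iff_eq, ← String.toList_inj, PySem.Str.toList_slice]
  rw [show PySem.Chars.slice q.toList none (some (k : Int))
        = PySem.List.slice q.toList none (some (k : Int)) from rfl,
    PySem.List.slice_to_natCast]

-- A's filter condition, read on the character lists: proper-prefix-hood.
lemma pv_cond_iff (q p : String) :
    (((q != p) && PySem.Str.startswith q p) = true)
    ↔ (p.toList <+: q.toList ∧ p.toList.length < q.toList.length) := by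
  rw [Bool.and_eq_true, bne_iff_ne,
    show PySem.Str.startswith q p = PySem.Chars.startswith q.toList p.toList from by
      simp [PySem.Str.startswith],
    PySem.Chars.startswith_iff]
  constructor
  · rintro ⟨hne, hpre⟩
    refine ⟨hpre, ?_⟩
    rcases Nat.lt_or_ge p.toList.length q.toList.length with h | h
    · exact h
    · have hlen : p.toList.length = q.toList.length :=
        Nat.le_antisymm hpre.length_le h
      exact absurd (String.toList_inj.mp (hpre.eq_of_length hlen)).symm hne
  · rintro ⟨hpre, hlt⟩
    refine ⟨?_, hpre⟩
    intro h
    subst h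
    omega

-- The contribution of one key q of the dict to child_sum[p] equals A's summand.
lemma pv_contrib (d : PySem.Dict String Int) (p q : String) (c : Int)
    (hc : d.contains p = true) :
    c * (((PySem.List.pyRange 0 (PySem.Str.len q)).countP
          (fun l => (PySem.Str.slice q none (some l) == p) && d.contains p)) : Int)
    = (if (q != p) && PySem.Str.startswith q p then c else 0) := by
  rw [PySem.Str.len_eq, PySem.List.pyRange_zero_natCast, List.countP_map]
  have hpred : ∀ k ∈ List.range q.toList.length,
      (((fun l => (PySem.Str.slice q none (some l) == p) && d.contains p)
          ∘ (fun k : Nat => (k : Int))) k = true)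
      ↔ ((fun k => decide (q.toList.take k = p.toList)) k = true) := by
    intro k _
    simp only [Function.comp_apply, hc, Bool.and_true, decide_eq_true_eq]
    exact pv_slice_eq_iff q p k
  rw [List.countP_congr hpred, pv_countP_prefix]
  by_cases hq : p.toList <+: q.toList ∧ p.toList.length < q.toList.length
  · rw [if_pos hq, if_pos ((pv_cond_iff q p).mpr hq)]
    ring
  · rw [if_neg hq, if_neg (fun h => hq ((pv_cond_iff q p).mp h))]
    ring

-- Effect of B's whole accumulation pass on one entry p that is a key.
lemma pv_outer_getD (d : PySem.Dict String Int) (p : String) (hc : d.contains p = true)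
    (l : List (String × Int)) (m : PySem.Dict String Int) :
    (l.foldl (fun m kv =>
        (PySem.List.pyRange 0 (PySem.Str.len kv.1)).foldl (fun m li =>
          if d.contains (PySem.Str.slice kv.1 none (some li))
          then m.modify (PySem.Str.slice kv.1 none (some li)) 0 (· + kv.2)
          else m) m) m).getD p 0
    = m.getD p 0
      + (l.map (fun kv =>
          if (kv.1 != p) && PySem.Str.startswith kv.1 p then kv.2 else 0)).sum := by
  induction l generalizing m with
  | nil => simp
  | cons kv t ih =>
      rw [List.foldl_cons, ih, pv_inner_getD, pv_contrib d p kv.1 kv.2 hc,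
        List.map_cons, List.sum_cons]
      ring

-- A's inner scan over the dict computes the same sum, entry by entry.
lemma pv_childA (d : PySem.Dict String Int) (hnd : d.keys.Nodup) (p : String)
    (l : List (String × Int)) (hl : ∀ kv ∈ l, kv ∈ d.items) (acc : Int) :
    l.foldl (fun child_count kv =>
        if (kv.1 != p) && PySem.Str.startswith kv.1 p
        then child_count + d.getD kv.1 0 else child_count) acc
    = acc + (l.map (fun kv =>
        if (kv.1 != p) && PySem.Str.startswith kv.1 p then kv.2 else 0)).sum := by
  induction l generalizing acc with
  | nil => simp
  | cons kv t ih =>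
      have hv : d.getD kv.1 0 = kv.2 := by
        have hmem : (kv.1, kv.2) ∈ d.items := by
          have := hl kv (List.mem_cons_self ..)
          simpa using this
        exact PySem.Dict.getD_of_mem_items d hmem hnd 0
      rw [List.foldl_cons, List.map_cons, List.sum_cons,
        ih (fun x hx => hl x (List.mem_cons_of_mem _ hx))]
      cases hcond : ((kv.1 != p) && PySem.Str.startswith kv.1 p) with
      | false => simp
      | true =>
          simp [hv]
          ring

-- ===== VERDICT (by name: the statement is the Claim_ definition above) =====
theorem filter_to_leaf_prefixes_spec : Claim_equal_filter_to_leaf_prefixes := by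
  intro pc _hdom hpre
  unfold Spec_filter_to_leaf_prefixes
  simp only [filter_to_leaf_prefixes, filter_to_leaf_prefixes_alt]
  have hnd : (PySem.Dict.mk pc).keys.Nodup := by
    rw [PySem.Dict.keys_mk]; exact hpre
  have hA := PySem.List.foldl_append_if
    (fun p => decide ((PySem.Dict.mk pc).items.foldl (fun child_count kv =>
        if (kv.1 != p) && PySem.Str.startswith kv.1 p
        then child_count + (PySem.Dict.mk pc).getD kv.1 0 else child_count) 0
      < (PySem.Dict.mk pc).getD p 0))
    (fun p => (p, (PySem.Dict.mk pc).getD p 0))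
    (PySem.List.sorted (PySem.Dict.mk pc).keys (fun s => PySem.Str.len s)) []
  simp only [decide_eq_true_eq] at hA
  rw [hA, List.nil_append]
  have hfil :
      List.filter (fun p => decide ((PySem.Dict.mk pc).items.foldl (fun child_count kv =>
          if (kv.1 != p) && PySem.Str.startswith kv.1 p
          then child_count + (PySem.Dict.mk pc).getD kv.1 0 else child_count) 0
        < (PySem.Dict.mk pc).getD p 0))
        (PySem.List.sorted (PySem.Dict.mk pc).keys (fun s => PySem.Str.len s))
      = List.filter (fun p => decide
          (((PySem.Dict.mk pc).items.foldl (fun m kv =>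
              (PySem.List.pyRange 0 (PySem.Str.len kv.1)).foldl (fun m l =>
                if (PySem.Dict.mk pc).contains (PySem.Str.slice kv.1 none (some l))
                then m.modify (PySem.Str.slice kv.1 none (some l)) 0 (· + kv.2)
                else m) m)
            ((PySem.Dict.mk pc).keys.foldl (fun m p => m.insert p 0)
              PySem.Dict.empty)).getD p 0
          < (PySem.Dict.mk pc).getD p 0))
        (PySem.List.sorted (PySem.Dict.mk pc).keys (fun s => PySem.Str.len s)) := by
    apply List.filter_congr
    intro p hp
    have hmem : p ∈ (PySem.Dict.mk pc).keys := by
      have := (PySem.List.mem_sorted _ _ _ p).mp hp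
      exact this
    have hcont : (PySem.Dict.mk pc).contains p = true := by
      rw [PySem.Dict.contains_eq_decide_mem_keys]
      simpa using hmem
    rw [pv_childA (PySem.Dict.mk pc) hnd p (PySem.Dict.mk pc).items (fun kv h => h) 0,
      pv_outer_getD (PySem.Dict.mk pc) p hcont,
      pv_cs0_getD _ _ _ (PySem.Dict.getD_empty p 0)]
  rw [hfil]
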